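-- pv_equiv track=rewrite | github.com/YeahHuang/Codejam | 2020-round2/incrementalHoustofPancakes.py | find
-- ===== SOURCE A (Python) =====
-- MAX_ANS = 25*int(1e8)
--
-- def find(start, summ):
--     l, r = 1, MAX_ANS
--     while l <= r:
--         mid = (l + r ) // 2
--         if mid * (start + start + mid - 1) // 2 <= summ:
--             l = mid + 1
--         else:
--             r = mid - 1
--     return r
-- ===== SOURCE B (Python) =====
-- MAX_ANS = 25*int(1e8)
--
-- def _isqrt(n):
--     # Heron/Newton integer square root (floor), no imports
--     if n <= 1:
--         return n
--     x = n // 2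
--     y = (x + n // x) // 2
--     while y < x:
--         x = y
--         y = (x + n // x) // 2
--     return x
--
-- def find(start, summ):
--     if summ < start:
--         return 0
--     d = (2 * start - 1) ** 2 + 8 * summ
--     s = _isqrt(d)
--     n = (s - (2 * start - 1)) // 2
--     if (n + 1) * (2 * start + n) // 2 <= summ:
--         n += 1
--     return min(n, MAX_ANS)
-- ===== Notes on version B (the rewrite author's own statement) =====
-- stated objective: alternative
-- what changed: Replaces the 35-step binary search over [1, 25e8] by a closed-form solution of the quadratic n*(2*start+n-1)/2 <= summ: compute the discriminant (2*start-1)^2+8*summ, take its integer square root (hand-written Heron iteration, since A imports nothing), derive the candidate n, correct it by one exact integer test, and clamp to MAX_ANS.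
-- outside the precondition, e.g. on find(-60, -100): A returns 119, B returns 0
import Mathlib
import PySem

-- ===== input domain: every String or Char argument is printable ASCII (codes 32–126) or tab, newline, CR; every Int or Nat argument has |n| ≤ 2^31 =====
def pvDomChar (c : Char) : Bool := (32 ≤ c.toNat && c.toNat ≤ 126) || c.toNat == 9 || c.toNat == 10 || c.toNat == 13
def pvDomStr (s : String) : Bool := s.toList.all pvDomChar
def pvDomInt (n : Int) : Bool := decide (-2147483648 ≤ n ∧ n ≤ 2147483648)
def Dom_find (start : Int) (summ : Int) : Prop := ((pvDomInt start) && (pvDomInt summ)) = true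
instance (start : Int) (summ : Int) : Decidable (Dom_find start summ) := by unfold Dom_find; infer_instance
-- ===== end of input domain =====

-- B replaces A's binary search by a closed-form quadratic solution via a hand-written
-- Heron integer square root plus one exact corrective test (objective: alternative).

-- ===== PORT A =====
def MAX_ANS : Int := 25 * 100000000

-- the while-loop of A: l, r updated until l > r, result is r
def findLoop (start : Int) (summ : Int) (l : Int) (r : Int) : Int :=
  if h : l ≤ r then
    let mid := PySem.Int.floordiv (l + r) 2
    if PySem.Int.floordiv (mid * (start + start + mid - 1)) 2 ≤ summ then
      findLoop start summ (mid + 1) r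
    else
      findLoop start summ l (mid - 1)
  else r
termination_by (r + 1 - l).toNat
decreasing_by
  · have hb := PySem.Int.floordiv_two_mid_bounds h
    omega
  · have hb := PySem.Int.floordiv_two_mid_bounds h
    omega

def find (start : Int) (summ : Int) : Int :=
  findLoop start summ 1 MAX_ANS

-- ===== PORT B =====
-- Heron/Newton loop of Source B's _isqrt: x := y while y < x (proof arguments only make
-- the recursion well-founded; they are exactly the states the Python loop visits)
def isqrtIter (n : Int) (x : Int) (hn : 2 ≤ n) (hx : 1 ≤ x) : Int :=
  let y := PySem.Int.floordiv (x + PySem.Int.floordiv n x) 2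
  if h : y < x then
    isqrtIter n y hn (by
      have hq : 0 ≤ PySem.Int.floordiv n x := by
        rw [PySem.Int.le_floordiv_iff_mul_le (by omega)]
        nlinarith
      rcases le_or_gt 2 x with hx2 | hx2
      · show 1 ≤ PySem.Int.floordiv (x + PySem.Int.floordiv n x) 2
        rw [PySem.Int.le_floordiv_iff_mul_le (by omega)]
        omega
      · have hx1 : x = 1 := by omega
        have hq1 : 1 ≤ PySem.Int.floordiv n x := by
          rw [PySem.Int.le_floordiv_iff_mul_le (by omega)]
          omega
        show 1 ≤ PySem.Int.floordiv (x + PySem.Int.floordiv n x) 2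
        rw [PySem.Int.le_floordiv_iff_mul_le (by omega)]
        omega)
  else x
termination_by x.toNat
decreasing_by
  have hq : 0 ≤ PySem.Int.floordiv n x := by
    rw [PySem.Int.le_floordiv_iff_mul_le (by omega)]
    nlinarith
  have h0 : 0 ≤ PySem.Int.floordiv (x + PySem.Int.floordiv n x) 2 := by
    rw [PySem.Int.le_floordiv_iff_mul_le (by omega)]
    omega
  omega

-- Source B's _isqrt
def isqrtInt (n : Int) : Int :=
  if h : n ≤ 1 then n
  else
    isqrtIter n (PySem.Int.floordiv n 2) (by omega)
      (by rw [PySem.Int.le_floordiv_iff_mul_le (by omega)]; omega)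

def find_alt (start : Int) (summ : Int) : Int :=
  if summ < start then 0
  else
    let d := (2 * start - 1) ^ 2 + 8 * summ
    let s := isqrtInt d
    let n0 := PySem.Int.floordiv (s - (2 * start - 1)) 2
    let n1 :=
      if PySem.Int.floordiv ((n0 + 1) * (2 * start + n0)) 2 ≤ summ then n0 + 1 else n0
    min n1 MAX_ANS

-- ===== PRECONDITION & SPEC =====
-- Pre_ excludes negative start (not a meaningful stack height for this Code Jam task):
-- there A's integer test is non-monotone in mid, so the binary search's return value is
-- an accident of the probe sequence rather than "the largest n whose series sum fits".
def Pre_find (start : Int) (summ : Int) : Prop := 0 ≤ start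
instance (start : Int) (summ : Int) : Decidable (Pre_find start summ) := by unfold Pre_find; infer_instance

def pvWitness_find : Int × Int := (3, 10)

def Spec_find (start : Int) (summ : Int) (out : Int) : Prop := out = find_alt start summ
instance (start : Int) (summ : Int) (out : Int) : Decidable (Spec_find start summ out) := by unfold Spec_find; infer_instance

-- ===== CLAIM (what is proved, stated in full; the proofs are below) =====
def Claim_equal_find : Prop := ∀ (start : Int) (summ : Int), Dom_find start summ → Pre_find start summ → Spec_find start summ (find start summ)

-- ===== LEMMAS AND PROOFS =====

-- The loop's test `mid*(start+start+mid-1)//2 <= summ` is exactly `mid*(2a+mid-1) ≤ 2S`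
-- (the product is always even).
theorem pv_test_iff (a S mid : Int) :
    (PySem.Int.floordiv (mid * (a + a + mid - 1)) 2 ≤ S) ↔ mid * (2 * a + mid - 1) ≤ 2 * S := by
  obtain ⟨k, hk⟩ := Int.even_mul_succ_self (mid - 1)
  have he : mid * (a + a + mid - 1) = 2 * (k + a * mid) := by
    linear_combination hk
  have hfd := PySem.Int.floordiv_mul_add_mod (mid * (a + a + mid - 1)) 2
  have hm0 := PySem.Int.mod_nonneg (mid * (a + a + mid - 1)) (show (0:Int) < 2 by norm_num)
  have hm2 := PySem.Int.mod_lt (mid * (a + a + mid - 1)) (show (0:Int) < 2 by norm_num)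
  have hg : mid * (2 * a + mid - 1) = mid * (a + a + mid - 1) := by ring
  rw [hg]
  omega

-- monotonicity of the test for a ≥ 0 on m ≥ 1
theorem pv_mono (a S m m' : Int) (ha : 0 ≤ a) (hm : 1 ≤ m) (hmm : m ≤ m')
    (h : m' * (2 * a + m' - 1) ≤ 2 * S) : m * (2 * a + m - 1) ≤ 2 * S := by
  nlinarith [mul_nonneg (sub_nonneg.mpr hmm) (show (0:Int) ≤ 2 * a + m + m' - 1 by omega)]

-- A's binary search returns any n characterized by the invariant below.
theorem pv_findLoop_eq (a S n : Int) :
    ∀ (k : Nat) (l r : Int), (r + 1 - l).toNat = k →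
      l - 1 ≤ n → n ≤ r →
      (∀ m, l ≤ m → m ≤ n → m * (2 * a + m - 1) ≤ 2 * S) →
      (∀ m, n < m → m ≤ r → ¬ (m * (2 * a + m - 1) ≤ 2 * S)) →
      findLoop a S l r = n := by
  intro k
  induction k using Nat.strong_induction_on with
  | _ k ih =>
    intro l r hk hl hr hQ hnQ
    rw [findLoop]
    by_cases hlr : l ≤ r
    · simp only [hlr, dite_true]
      have hb := PySem.Int.floordiv_two_mid_bounds hlr
      set mid := PySem.Int.floordiv (l + r) 2 with hmid
      by_cases ht : PySem.Int.floordiv (mid * (a + a + mid - 1)) 2 ≤ S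
      · simp only [ht, ite_true]
        have hQm : mid * (2 * a + mid - 1) ≤ 2 * S := (pv_test_iff a S mid).mp ht
        have hmn : mid ≤ n := by
          by_contra hc
          exact hnQ mid (by omega) (by omega) hQm
        exact ih ((r + 1 - (mid + 1)).toNat) (by omega) (mid + 1) r rfl (by omega) hr
          (fun m h1 h2 => hQ m (by omega) h2) hnQ
      · simp only [ht, ite_false]
        have hnm : n < mid := by
          by_contra hc
          exact ht ((pv_test_iff a S mid).mpr (hQ mid (by omega) (by omega)))
        exact ih ((mid - 1 + 1 - l).toNat) (by omega) l (mid - 1) rfl hl (by omega)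
          hQ (fun m h1 h2 => hnQ m h1 (by omega))
    · simp only [hlr, dite_false]
      omega

-- Heron iteration: given every nonnegative t with t*t ≤ n satisfies t ≤ x,
-- the result r satisfies 1 ≤ r, r*r ≤ n, and is an upper bound of all such t.
theorem pv_isqrtIter_spec (n : Int) :
    ∀ (k : Nat) (x : Int) (hn : 2 ≤ n) (hx : 1 ≤ x), x.toNat = k →
      (∀ t : Int, 0 ≤ t → t * t ≤ n → t ≤ x) →
      1 ≤ isqrtIter n x hn hx ∧ isqrtIter n x hn hx * isqrtIter n x hn hx ≤ n ∧
      (∀ t : Int, 0 ≤ t → t * t ≤ n → t ≤ isqrtIter n x hn hx) := by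
  intro k
  induction k using Nat.strong_induction_on with
  | _ k ih =>
    intro x hn hx hk hinv
    rw [isqrtIter]
    have hq : 0 ≤ PySem.Int.floordiv n x := by
      rw [PySem.Int.le_floordiv_iff_mul_le (by omega)]
      nlinarith
    set q := PySem.Int.floordiv n x with hqdef
    set y := PySem.Int.floordiv (x + q) 2 with hydef
    have hy0 : 0 ≤ y := by
      rw [hydef, PySem.Int.le_floordiv_iff_mul_le (by omega)]
      omega
    by_cases h : y < x
    · rw [dif_pos h]
      have hy1 : 1 ≤ y := by
        rcases le_or_gt 2 x with hx2 | hx2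
        · rw [hydef, PySem.Int.le_floordiv_iff_mul_le (by omega)]
          omega
        · have hx1 : x = 1 := by omega
          have hq1 : 1 ≤ q := by
            rw [hqdef, PySem.Int.le_floordiv_iff_mul_le (by omega)]
            omega
          rw [hydef, PySem.Int.le_floordiv_iff_mul_le (by omega)]
          omega
      have hinv' : ∀ t : Int, 0 ≤ t → t * t ≤ n → t ≤ y := by
        intro t ht0 ht2
        have htx := hinv t ht0 ht2
        have hqt : 2 * t - x ≤ q := by
          rcases le_or_gt (2 * t - x) 0 with hc | hc
          · omega
          · rw [hqdef, PySem.Int.le_floordiv_iff_mul_le (by omega)]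
            nlinarith [sq_nonneg (t - x)]
        rw [hydef, PySem.Int.le_floordiv_iff_mul_le (by omega)]
        omega
      exact ih y.toNat (by omega) y hn hy1 rfl hinv'
    · rw [dif_neg h]
      refine ⟨hx, ?_, hinv⟩
      -- x ≤ y forces n//x ≥ x, hence x*x ≤ n
      have h2y : y * 2 ≤ x + q := by
        have hfd := PySem.Int.floordiv_mul_add_mod (x + q) 2
        have hm0 := PySem.Int.mod_nonneg (x + q) (show (0:Int) < 2 by norm_num)
        omega
      have hxq : x ≤ q := by omega
      have := (PySem.Int.le_floordiv_iff_mul_le (show (0:Int) < x by omega)).mp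
        (hqdef ▸ hxq)
      linarith
-- (note: the last step reads x*x ≤ n from x ≤ n//x)

theorem pv_isqrtInt_spec (n : Int) (h1 : 1 ≤ n) :
    1 ≤ isqrtInt n ∧ isqrtInt n * isqrtInt n ≤ n ∧
    (∀ t : Int, 0 ≤ t → t * t ≤ n → t ≤ isqrtInt n) := by
  rw [isqrtInt]
  by_cases h : n ≤ 1
  · rw [dif_pos h]
    have : n = 1 := by omega
    subst this
    refine ⟨le_refl 1, by norm_num, ?_⟩
    intro t ht0 ht2
    nlinarith
  · rw [dif_neg h]
    apply pv_isqrtIter_spec n (PySem.Int.floordiv n 2).toNat _ _ _ rfl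
    intro t ht0 ht2
    rw [PySem.Int.le_floordiv_iff_mul_le (by omega)]
    rcases le_or_gt t 1 with hc | hc
    · omega
    · nlinarith

-- characterization of B's result, for 0 ≤ start
theorem pv_alt_spec (a S : Int) (ha : 0 ≤ a) :
    0 ≤ find_alt a S ∧ find_alt a S ≤ MAX_ANS ∧
    (∀ m, 1 ≤ m → m ≤ find_alt a S → m * (2 * a + m - 1) ≤ 2 * S) ∧
    (∀ m, find_alt a S < m → m ≤ MAX_ANS → ¬ (m * (2 * a + m - 1) ≤ 2 * S)) := by
  have hMA : MAX_ANS = 2500000000 := by norm_num [MAX_ANS]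
  rw [find_alt]
  by_cases hs : S < a
  · simp only [hs, ite_true]
    refine ⟨le_refl 0, by norm_num [MAX_ANS], ?_, ?_⟩
    · intro m h1 h2; omega
    · intro m h1 h2 hQ
      nlinarith [mul_nonneg (show (0:Int) ≤ m - 1 by omega) (show (0:Int) ≤ 2 * a + m by omega)]
  · simp only [hs, ite_false]
    have hSa : a ≤ S := by omega
    set d := (2 * a - 1) ^ 2 + 8 * S with hd
    have hd1 : 1 ≤ d := by
      rcases le_or_gt 1 a with hc | hc
      · nlinarith
      · have : a = 0 := by omega
        subst this; nlinarith
    obtain ⟨hs1, hs2, hs3⟩ := pv_isqrtInt_spec d hd1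
    set s := isqrtInt d with hsdef
    have hsmax : ¬ ((s + 1) * (s + 1) ≤ d) := by
      intro hcon
      have := hs3 (s + 1) (by omega) hcon
      omega
    set n0 := PySem.Int.floordiv (s - (2 * a - 1)) 2 with hn0
    -- bracket for n0
    have hfd := PySem.Int.floordiv_mul_add_mod (s - (2 * a - 1)) 2
    have hm0 := PySem.Int.mod_nonneg (s - (2 * a - 1)) (show (0:Int) < 2 by norm_num)
    have hm2 := PySem.Int.mod_lt (s - (2 * a - 1)) (show (0:Int) < 2 by norm_num)
    have hu1 : 2 * n0 + (2 * a - 1) ≤ s := by rw [hn0]; omega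
    have hu2 : s ≤ 2 * n0 + (2 * a - 1) + 1 := by rw [hn0]; omega
    -- s ≥ 2a-1 (since d ≥ (2a-1)^2 and d < (s+1)^2), hence n0 ≥ 0
    have hst : 2 * a - 1 ≤ s := by
      by_contra hc
      rw [not_le] at hc
      have : (s + 1) * (s + 1) ≤ (2 * a - 1) * (2 * a - 1) := by nlinarith
      nlinarith
    have hn00 : 0 ≤ n0 := by omega
    -- Q n0 and ¬ Q (n0+2)
    have hQn0 : n0 * (2 * a + n0 - 1) ≤ 2 * S := by
      nlinarith [hs2, hu1, hst]
    have hnQ2 : ¬ ((n0 + 2) * (2 * a + (n0 + 2) - 1) ≤ 2 * S) := by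
      intro hcon
      have : (2 * n0 + (2 * a - 1) + 4) * (2 * n0 + (2 * a - 1) + 4) ≤ d := by nlinarith
      nlinarith
    -- the corrective test is exactly Q (n0+1)
    have htest : (PySem.Int.floordiv ((n0 + 1) * (2 * a + n0)) 2 ≤ S) ↔
        (n0 + 1) * (2 * a + (n0 + 1) - 1) ≤ 2 * S := by
      have hsh : (n0 + 1) * (2 * a + n0) = (n0 + 1) * (a + a + (n0 + 1) - 1) := by ring
      rw [hsh]
      exact pv_test_iff a S (n0 + 1)
    by_cases hb : PySem.Int.floordiv ((n0 + 1) * (2 * a + n0)) 2 ≤ S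
    · simp only [hb, ite_true]
      have hQ1 : (n0 + 1) * (2 * a + (n0 + 1) - 1) ≤ 2 * S := htest.mp hb
      refine ⟨by omega, min_le_right _ _, ?_, ?_⟩
      · intro m h1 h2
        exact pv_mono a S m (n0 + 1) ha h1 (by omega) hQ1
      · intro m h1 h2 hQ
        have hvm : min (n0 + 1) MAX_ANS < m := h1
        rcases le_or_gt (n0 + 1) MAX_ANS with hc | hc
        · rw [min_eq_left hc] at hvm
          exact hnQ2 (pv_mono a S (n0 + 2) m ha (by omega) (by omega) hQ)
        · rw [min_eq_right (by omega)] at hvm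
          omega
    · simp only [hb, ite_false]
      have hnQ1 : ¬ ((n0 + 1) * (2 * a + (n0 + 1) - 1) ≤ 2 * S) := fun hh => hb (htest.mpr hh)
      refine ⟨by omega, min_le_right _ _, ?_, ?_⟩
      · intro m h1 h2
        have h2' : m ≤ n0 := le_trans h2 (min_le_left _ _)
        exact pv_mono a S m n0 ha h1 h2' hQn0
      · intro m h1 h2 hQ
        have hvm : min n0 MAX_ANS < m := h1
        rcases le_or_gt n0 MAX_ANS with hc | hc
        · rw [min_eq_left hc] at hvm
          exact hnQ1 (pv_mono a S (n0 + 1) m ha (by omega) (by omega) hQ)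
        · rw [min_eq_right (by omega)] at hvm
          omega

-- ===== VERDICT (by name: the statement is the Claim_ definition above) =====
theorem find_spec : Claim_equal_find := by
  intro a S hdom hpre
  have ha : 0 ≤ a := hpre
  obtain ⟨h0, hM, hQle, hQgt⟩ := pv_alt_spec a S ha
  show find a S = find_alt a S
  rw [find]
  exact pv_findLoop_eq a S (find_alt a S) (MAX_ANS + 1 - 1).toNat 1 MAX_ANS rfl
    (by omega) hM hQle hQgt
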